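-- pv_equiv track=rewrite | github.com/SSUNOWL/adventofcode | day7/day7.py | dus
-- ===== SOURCE A (Python) =====
-- def conn(x, y):
--     return int(str(x) + str(y))
--
-- def dus(a, y, now):
--     duss = []
--
--     if ( now < len(y)):
--         for i in a:
--             duss.append(int(i) + int(y[now]))
--             duss.append(int(i) * int(y[now]))
--             duss.append(conn(int(i), int(y[now]))) #part2
--         return dus(duss, y, now + 1)
--     else:
--         return a
-- ===== SOURCE B (Python) =====
-- def dus(a, y, now):
--     # Iterative rewrite: replace the recursion with a while loop that rebuilds
--     # the list level by level with a single flat comprehension (conn inlined).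
--     # An empty list stays empty, so the loop also stops then.
--     while a and now < len(y):
--         v = y[now]
--         a = [r for i in a for r in (i + v, i * v, int(str(i) + str(v)))]
--         now += 1
--     return a
-- ===== Notes on version B (the rewrite author's own statement) =====
-- stated objective: simpler
-- what changed: The recursive helper-calling version is replaced by an iterative while loop that rebuilds the list each level with a single flat comprehension (conn inlined).
import Mathlib
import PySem

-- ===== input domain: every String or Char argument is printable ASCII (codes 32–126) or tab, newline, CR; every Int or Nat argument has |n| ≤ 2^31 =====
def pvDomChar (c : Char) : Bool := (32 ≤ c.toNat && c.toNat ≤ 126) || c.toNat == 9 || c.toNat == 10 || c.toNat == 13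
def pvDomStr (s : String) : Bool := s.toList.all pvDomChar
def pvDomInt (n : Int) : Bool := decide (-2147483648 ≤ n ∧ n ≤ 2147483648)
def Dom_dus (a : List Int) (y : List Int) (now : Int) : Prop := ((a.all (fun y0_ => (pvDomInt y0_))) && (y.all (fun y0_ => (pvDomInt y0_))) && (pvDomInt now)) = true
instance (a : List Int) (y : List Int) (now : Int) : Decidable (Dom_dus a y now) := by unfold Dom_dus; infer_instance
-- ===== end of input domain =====

-- B replaces A's recursion by an iterative while loop rebuilding the list with a flat comprehension (simpler); RETURN value equivalence.

-- ===== PORT A =====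
-- conn(x, y) = int(str(x) + str(y)); int(...) raises ValueError where ofStr? is none — those inputs are outside Pre_dus.
def conn (x : Int) (y : Int) : Int :=
  (PySem.Int.ofStr? (PySem.Int.toStr x ++ PySem.Int.toStr y)).getD 0

def dus (a : List Int) (y : List Int) (now : Int) : List Int :=
  if now < (y.length : Int) then
    -- for i in a: duss.append(i + y[now]); duss.append(i * y[now]); duss.append(conn(i, y[now]))
    -- y[now] raising IndexError (pyGet? = none) lies outside Pre_dus.
    let duss := a.foldl (fun ds i =>
      let v := (PySem.List.pyGet? y now).getD 0
      ds ++ [i + v] ++ [i * v] ++ [conn i v]) []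
    dus duss y (now + 1)
  else a
termination_by (y.length - now).toNat
decreasing_by simp at *; omega

-- ===== PORT B =====
-- while a and now < len(y): ...  — ported with fuel = number of remaining loop steps (len(y) - now).
def dusAltGo (y : List Int) : Nat → List Int → Int → List Int
  | 0, a, _ => a
  | fuel + 1, a, now =>
    if a.isEmpty then a
    else
      let v := (PySem.List.pyGet? y now).getD 0
      dusAltGo y fuel
        (a.flatMap fun i => [i + v, i * v,
          (PySem.Int.ofStr? (PySem.Int.toStr i ++ PySem.Int.toStr v)).getD 0])
        (now + 1)

def dus_alt (a : List Int) (y : List Int) (now : Int) : List Int :=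
  dusAltGo y ((y.length : Int) - now).toNat a now

-- ===== PRECONDITION & SPEC =====
-- Pre_dus = exactly the inputs on which Python A returns: with a nonempty and now < len(y),
-- A raises IndexError when now < -len(y), and ValueError in conn when an accessed y value is
-- negative (the accessed values are y[now:] for now ≥ 0, and all of y for negative now).
def Pre_dus (a : List Int) (y : List Int) (now : Int) : Prop :=
  a = [] ∨ (y.length : Int) ≤ now ∨
    (-(y.length : Int) ≤ now ∧
      ((0 ≤ now ∧ ∀ v ∈ y.drop now.toNat, 0 ≤ v) ∨ (now < 0 ∧ ∀ v ∈ y, 0 ≤ v)))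
instance (a : List Int) (y : List Int) (now : Int) : Decidable (Pre_dus a y now) := by
  unfold Pre_dus; infer_instance

def pvWitness_dus : List Int × List Int × Int := ([1, 2], [3, 4], 0)

def Spec_dus (a : List Int) (y : List Int) (now : Int) (out : List Int) : Prop := out = dus_alt a y now
instance (a : List Int) (y : List Int) (now : Int) (out : List Int) : Decidable (Spec_dus a y now out) := by unfold Spec_dus; infer_instance

-- ===== CLAIM (what is proved, stated in full; the proofs are below) =====
def Claim_equal_dus : Prop := ∀ (a : List Int) (y : List Int) (now : Int), Dom_dus a y now → Pre_dus a y now → Spec_dus a y now (dus a y now)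

-- ===== LEMMAS AND PROOFS =====

theorem dus_nil (y : List Int) (now : Int) : dus [] y now = [] := by
  unfold dus
  split
  · exact dus_nil y (now + 1)
  · rfl
termination_by (y.length - now).toNat
decreasing_by simp at *; omega

theorem dus_eq_go (y : List Int) (fuel : Nat) (a : List Int) (now : Int)
    (h : fuel = ((y.length : Int) - now).toNat) : dus a y now = dusAltGo y fuel a now := by
  induction fuel generalizing a now with
  | zero =>
    unfold dus dusAltGo
    rw [if_neg (by omega)]
  | succ n ih =>
    have hlt : now < (y.length : Int) := by omega
    unfold dus dusAltGo
    rw [if_pos hlt]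
    by_cases ha : a = []
    · subst ha
      simp only [List.isEmpty_nil, if_pos]
      simpa using dus_nil y (now + 1)
    · rw [if_neg (by simpa [List.isEmpty_iff] using ha)]
      rw [show (fun (ds : List Int) (i : Int) =>
            let v := (PySem.List.pyGet? y now).getD 0
            ds ++ [i + v] ++ [i * v] ++ [conn i v]) =
          (fun ds i =>
            ds ++ (fun i => [i + (PySem.List.pyGet? y now).getD 0,
              i * (PySem.List.pyGet? y now).getD 0,
              (PySem.Int.ofStr? (PySem.Int.toStr i ++
                PySem.Int.toStr ((PySem.List.pyGet? y now).getD 0))).getD 0]) i)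
        from by funext ds i; simp [conn]]
      rw [PySem.List.foldl_append_eq_flatMap]
      exact (List.nil_append _) ▸ ih _ (now + 1) (by omega)

-- ===== VERDICT (by name: the statement is the Claim_ definition above) =====
theorem dus_spec : Claim_equal_dus := by
  intro a y now _ _
  unfold Spec_dus dus_alt
  exact dus_eq_go y _ a now rfl
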